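-- pv_equiv track=rewrite | github.com/mfelleisen/Transformations | llms/generate_highs.py | clean_example
-- ===== SOURCE A (Python) =====
-- def clean_example(ex: str) -> str:
--     # stop cleaning as soon as you find "(..."
--     splits = ex.split("\n")
--     start = 0
--     for i, line in enumerate(splits):
--         if line.startswith("("):
--             start = i
--             break
--
--     cleaned = splits[start:]
--     cleaned = "\n".join(cleaned).strip()
--     # if it doesn't have "#lang racket" add it
--     if not cleaned.startswith("#lang racket"):
--         cleaned = "#lang racket\n" + cleaned
--     return cleaned
-- ===== SOURCE B (Python) =====
-- def clean_example(ex: str) -> str: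
--     # substring search for the first line that begins with "(" instead of
--     # splitting into lines and scanning them
--     if ex.startswith("("):
--         cleaned = ex
--     else:
--         i = ex.find("\n(")
--         cleaned = ex[i + 1:] if i != -1 else ex
--     cleaned = cleaned.strip()
--     if not cleaned.startswith("#lang racket"):
--         cleaned = "#lang racket\n" + cleaned
--     return cleaned
-- ===== Notes on version B (the rewrite author's own statement) =====
-- stated objective: idiomatic
-- what changed: Instead of splitting the text into a list of lines, scanning them with an indexed loop for the first line starting with '(' and re-joining the suffix, B searches the raw string once for the substring '\n(' (plus a startswith check for a '(' on the very first line) and slices the string at that offset; no line list is ever built.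
import Mathlib
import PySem

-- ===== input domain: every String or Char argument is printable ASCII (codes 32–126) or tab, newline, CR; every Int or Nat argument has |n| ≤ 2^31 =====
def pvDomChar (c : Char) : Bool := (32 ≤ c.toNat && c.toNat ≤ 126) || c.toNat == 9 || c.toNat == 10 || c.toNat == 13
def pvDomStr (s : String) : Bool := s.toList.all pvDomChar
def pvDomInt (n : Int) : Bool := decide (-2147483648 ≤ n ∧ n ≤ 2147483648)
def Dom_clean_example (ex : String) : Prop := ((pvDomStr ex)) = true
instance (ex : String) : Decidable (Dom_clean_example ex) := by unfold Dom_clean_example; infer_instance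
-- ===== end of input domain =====

-- B replaces A's split-into-lines + indexed scan by a single substring search for "\n(" on the raw string; same return value, no speed claim.

-- ===== PORT A =====
-- the 'for i, line in enumerate(splits): if line.startswith("("): start = i; break' loop
def cleanLoopA : List (List Char) → Nat → Option Nat
  | [], _ => none
  | l :: ls, i => if PySem.Chars.startswith l ['('] then some i else cleanLoopA ls (i + 1)

def cleanA (cs : List Char) : List Char :=
  let splits := PySem.Chars.splitOn cs ['\n']
  let start : Nat := (cleanLoopA splits 0).getD 0
  let cleaned := PySem.Chars.join ['\n'] (PySem.List.slice splits (some (start : Int)) none)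
  let cleaned2 := PySem.Chars.strip cleaned
  if PySem.Chars.startswith cleaned2 ("#lang racket".toList) then cleaned2
  else ("#lang racket\n".toList) ++ cleaned2

def clean_example (ex : String) : String := String.ofList (cleanA ex.toList)

-- ===== PORT B =====
def cleanB (cs : List Char) : List Char :=
  let cleaned0 :=
    if PySem.Chars.startswith cs ['('] then cs
    else
      let i := PySem.Chars.find cs ['\n', '(']
      if i ≠ -1 then PySem.Chars.slice cs (some (i + 1)) none else cs
  let cleaned := PySem.Chars.strip cleaned0
  if PySem.Chars.startswith cleaned ("#lang racket".toList) then cleaned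
  else ("#lang racket\n".toList) ++ cleaned

def clean_example_alt (ex : String) : String := String.ofList (cleanB ex.toList)

-- ===== PRECONDITION & SPEC =====
def Spec_clean_example (ex : String) (out : String) : Prop := out = clean_example_alt ex
instance (ex : String) (out : String) : Decidable (Spec_clean_example ex out) := by unfold Spec_clean_example; infer_instance

-- ===== CLAIM (what is proved, stated in full; the proofs are below) =====
def Claim_equal_clean_example : Prop := ∀ (ex : String), Dom_clean_example ex → Spec_clean_example ex (clean_example ex)

-- ===== LEMMAS AND PROOFS =====

-- reference splitting of a char list at '\n' (Python s.split("\n"))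
def mySplit : List Char → List (List Char)
  | [] => [[]]
  | c :: rest => if c = '\n' then [] :: mySplit rest else (mySplit rest).modifyHead (c :: ·)

-- the suffix of cs just after the first occurrence of "\n(" (i.e. from its '(')
def firstSuffix : List Char → Option (List Char)
  | [] => none
  | c :: rest =>
    if c = '\n' ∧ PySem.Chars.startswith rest ['('] then some rest else firstSuffix rest

theorem modifyHead_id' {α : Type} (l : List α) : List.modifyHead (fun x => x) l = l := by
  cases l <;> simp

theorem mySplit_ne_nil (cs : List Char) : mySplit cs ≠ [] := by
  induction cs with
  | nil => simp [mySplit]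
  | cons c rest ih =>
    simp only [mySplit]
    split
    · simp
    · cases h : mySplit rest with
      | nil => exact absurd h ih
      | cons a l => simp [List.modifyHead]

theorem splitOn_go_eq (fuel : Nat) : ∀ (l cur : List Char) (acc : List (List Char)),
    l.length < fuel →
    PySem.Chars.splitOn.go ['\n'] fuel l cur acc
      = acc.reverse ++ (mySplit l).modifyHead (fun x => cur.reverse ++ x) := by
  induction fuel with
  | zero => intro l cur acc h; omega
  | succ f ih =>
    intro l cur acc h
    cases l with
    | nil =>
      rw [PySem.Chars.splitOn.go]
      all_goals simp [mySplit, List.modifyHead]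
    | cons c rest =>
      rw [PySem.Chars.splitOn.go]
      by_cases hc : c = '\n'
      · subst hc
        have hpre : ['\n'].isPrefixOf ('\n' :: rest) = true := by simp [List.isPrefixOf]
        rw [if_pos hpre]
        have hd : List.drop (['\n'].length) ('\n' :: rest) = rest := by simp
        rw [hd, ih rest [] (cur.reverse :: acc) (by simpa using Nat.lt_of_succ_lt_succ h)]
        simp [mySplit, modifyHead_id']
      · have hpre : ['\n'].isPrefixOf (c :: rest) = false := by
          simp [List.isPrefixOf]; exact fun hx => hc hx.symm
        rw [if_neg (by simp [hpre])]
        rw [ih rest (c :: cur) acc (by simpa using Nat.lt_of_succ_lt_succ h)]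
        obtain ⟨hh, tt, hms⟩ : ∃ hh tt, mySplit rest = hh :: tt := by
          cases hx : mySplit rest with
          | nil => exact absurd hx (mySplit_ne_nil rest)
          | cons a l => exact ⟨a, l, rfl⟩
        simp [mySplit, hc, hms, List.modifyHead]

theorem splitOn_eq_mySplit (cs : List Char) :
    PySem.Chars.splitOn cs ['\n'] = mySplit cs := by
  show PySem.Chars.splitOn.go ['\n'] (cs.length + 1) cs [] [] = mySplit cs
  rw [splitOn_go_eq (cs.length + 1) cs [] [] (by omega)]
  simp [modifyHead_id']

theorem joinNl_modifyHead (c : Char) (ls : List (List Char)) (h : ls ≠ []) :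
    PySem.Chars.join ['\n'] (ls.modifyHead (c :: ·)) = c :: PySem.Chars.join ['\n'] ls := by
  cases ls with
  | nil => exact absurd rfl h
  | cons a t =>
    cases t with
    | nil => simp [PySem.Chars.join, List.intercalate, List.modifyHead]
    | cons b t2 =>
      simp [PySem.Chars.join, List.intercalate, List.modifyHead]

theorem joinNl_cons_cons (a b : List Char) (t : List (List Char)) :
    PySem.Chars.join ['\n'] (a :: b :: t)
      = a ++ '\n' :: PySem.Chars.join ['\n'] (b :: t) := by
  simp [PySem.Chars.join, List.intercalate]

theorem joinNl_mySplit (cs : List Char) :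
    PySem.Chars.join ['\n'] (mySplit cs) = cs := by
  induction cs with
  | nil => simp [mySplit, PySem.Chars.join, List.intercalate]
  | cons c rest ih =>
    simp only [mySplit]
    by_cases hc : c = '\n'
    · subst hc
      rw [if_pos rfl]
      obtain ⟨hh, tt, hms⟩ : ∃ hh tt, mySplit rest = hh :: tt := by
        cases hx : mySplit rest with
        | nil => exact absurd hx (mySplit_ne_nil rest)
        | cons a l => exact ⟨a, l, rfl⟩
      rw [hms] at ih ⊢
      rw [joinNl_cons_cons [] hh tt]
      simp [ih]
    · rw [if_neg hc, joinNl_modifyHead c _ (mySplit_ne_nil rest), ih]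

-- the head line of mySplit starts with '(' iff the whole string does
theorem headLine (cs : List Char) :
    ∃ h t, mySplit cs = h :: t ∧
      PySem.Chars.startswith h ['('] = PySem.Chars.startswith cs ['('] := by
  cases cs with
  | nil => exact ⟨[], [], rfl, rfl⟩
  | cons c rest =>
    by_cases hc : c = '\n'
    · subst hc
      refine ⟨[], mySplit rest, by simp [mySplit], ?_⟩
      simp [PySem.Chars.startswith, List.isPrefixOf]
    · obtain ⟨hh, tt, hms⟩ : ∃ hh tt, mySplit rest = hh :: tt := by
        cases hx : mySplit rest with
        | nil => exact absurd hx (mySplit_ne_nil rest)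
        | cons a l => exact ⟨a, l, rfl⟩
      refine ⟨c :: hh, tt, by simp [mySplit, hc, hms, List.modifyHead], ?_⟩
      simp [PySem.Chars.startswith, List.isPrefixOf]

-- A's loop with shifted counter
theorem cleanLoopA_shift (ls : List (List Char)) : ∀ i : Nat,
    cleanLoopA ls i = (cleanLoopA ls 0).map (· + i) := by
  induction ls with
  | nil => intro i; simp [cleanLoopA]
  | cons l t ih =>
    intro i
    simp only [cleanLoopA]
    by_cases hp : PySem.Chars.startswith l ['(']
    · simp [hp]
    · simp only [hp, if_false, Bool.false_eq_true]
      rw [ih (i + 1), ih 1]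
      cases cleanLoopA t 0 with
      | none => simp
      | some a => simp; omega

-- invariant: A's loop over the TAIL lines finds exactly the "\n(" suffix
theorem tail_invariant (cs : List Char) :
    match cleanLoopA ((mySplit cs).tail) 0 with
    | none => firstSuffix cs = none
    | some k => ∃ s, firstSuffix cs = some s ∧
        PySem.Chars.join ['\n'] (List.drop (k + 1) (mySplit cs)) = s := by
  induction cs with
  | nil => simp [mySplit, cleanLoopA, firstSuffix]
  | cons c rest ih =>
    by_cases hc : c = '\n'
    · subst hc
      obtain ⟨hh, tt, hms, hsw⟩ := headLine rest
      have htail : (mySplit ('\n' :: rest)).tail = hh :: tt := by simp [mySplit, hms]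
      rw [htail]
      simp only [cleanLoopA]
      by_cases hp : PySem.Chars.startswith hh ['(']
      · rw [if_pos hp]
        refine ⟨rest, ?_, ?_⟩
        · have heq : firstSuffix ('\n' :: rest)
              = if ('\n' = '\n' ∧ PySem.Chars.startswith rest ['(']) then some rest
                else firstSuffix rest := rfl
          rw [heq, if_pos ⟨rfl, by rw [← hsw]; exact hp⟩]
        · simp only [mySplit, if_pos]
          exact joinNl_mySplit rest
      · rw [if_neg (by simp [hp]), cleanLoopA_shift tt 1]
        have htail2 : (mySplit rest).tail = tt := by rw [hms]; rfl
        rw [htail2] at ih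
        have hfs : firstSuffix ('\n' :: rest) = firstSuffix rest := by
          simp only [firstSuffix]
          rw [if_neg]
          intro hx
          rw [hsw] at hp
          exact hp hx.2
        cases hL : cleanLoopA tt 0 with
        | none =>
          rw [hL] at ih
          simp only [Option.map_none]
          rw [hfs]; exact ih
        | some k =>
          rw [hL] at ih
          obtain ⟨s, hfs2, hjoin⟩ := ih
          simp only [Option.map_some]
          refine ⟨s, by rw [hfs]; exact hfs2, ?_⟩
          simp only [mySplit, if_pos]
          exact hjoin
    · obtain ⟨hh, tt, hms⟩ : ∃ hh tt, mySplit rest = hh :: tt := by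
        cases hx : mySplit rest with
        | nil => exact absurd hx (mySplit_ne_nil rest)
        | cons a l => exact ⟨a, l, rfl⟩
      have hmc : mySplit (c :: rest) = (c :: hh) :: tt := by
        simp [mySplit, hc, hms, List.modifyHead]
      have hfs : firstSuffix (c :: rest) = firstSuffix rest := by
        simp only [firstSuffix]
        rw [if_neg]
        intro hx
        exact hc hx.1
      rw [hmc]
      simp only [List.tail_cons]
      rw [hms] at ih
      simp only [List.tail_cons] at ih
      cases hL : cleanLoopA tt 0 with
      | none =>
        rw [hL] at ih
        show firstSuffix (c :: rest) = none
        rw [hfs]; exact ih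
      | some k =>
        rw [hL] at ih
        have ih' : ∃ s, firstSuffix rest = some s ∧
            PySem.Chars.join ['\n'] (List.drop (k + 1) (hh :: tt)) = s := ih
        obtain ⟨s, hfs2, hjoin⟩ := ih'
        show ∃ s, firstSuffix (c :: rest) = some s ∧
            PySem.Chars.join ['\n'] (List.drop (k + 1) ((c :: hh) :: tt)) = s
        refine ⟨s, by rw [hfs]; exact hfs2, ?_⟩
        simp only [List.drop_succ_cons] at hjoin ⊢
        exact hjoin

-- find.go with a shifted counter
theorem findGo_shift (sub : List Char) (hsub : sub ≠ []) : ∀ (l : List Char) (k : Nat),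
    PySem.Chars.find.go sub l k
      = if PySem.Chars.find.go sub l 0 = -1 then -1 else PySem.Chars.find.go sub l 0 + k := by
  intro l
  induction l with
  | nil =>
    intro k
    rw [PySem.Chars.find.go, PySem.Chars.find.go]
    simp [List.isEmpty_iff, hsub]
  | cons c t ih =>
    intro k
    have hgo : ∀ m : Nat, PySem.Chars.find.go sub (c :: t) m
        = if sub.isPrefixOf (c :: t) then (m : Int) else PySem.Chars.find.go sub t (m + 1) := by
      intro m; rw [PySem.Chars.find.go]
    rw [hgo k, hgo 0]
    by_cases hp : sub.isPrefixOf (c :: t)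
    · simp [hp]
    · simp only [hp, if_false, Bool.false_eq_true]
      have hge : -1 ≤ PySem.Chars.find.go sub t 0 := PySem.Chars.neg_one_le_find t sub
      rw [ih (k + 1), ih 1]
      by_cases hn : PySem.Chars.find.go sub t 0 = -1
      · simp [hn]
      · rw [if_neg hn, if_neg hn]
        omega

-- B's find of "\n(" vs the reference firstSuffix
theorem find_firstSuffix (cs : List Char) :
    (PySem.Chars.find cs ['\n', '('] = -1 ∧ firstSuffix cs = none) ∨
    (∃ j : Nat, PySem.Chars.find cs ['\n', '('] = (j : Int) ∧
      firstSuffix cs = some (cs.drop (j + 1))) := by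
  induction cs with
  | nil =>
    left
    constructor
    · show PySem.Chars.find.go ['\n', '('] [] 0 = -1
      rw [PySem.Chars.find.go]; simp
    · rfl
  | cons c t ih =>
    have hgo : PySem.Chars.find (c :: t) ['\n', '(']
        = if ['\n', '('].isPrefixOf (c :: t) then (0 : Int)
          else (if PySem.Chars.find t ['\n', '('] = -1 then -1
                else PySem.Chars.find t ['\n', '('] + 1) := by
      show PySem.Chars.find.go ['\n', '('] (c :: t) 0 = _
      rw [PySem.Chars.find.go]
      rw [findGo_shift ['\n', '('] (by simp) t 1]
      rfl
    by_cases hp : ['\n', '('].isPrefixOf (c :: t)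
    · right
      have hp' : '\n' = c ∧ ['('] <+: t := by simpa [List.isPrefixOf] using hp
      refine ⟨0, by rw [hgo, if_pos hp]; norm_num, ?_⟩
      have heq : firstSuffix (c :: t)
          = if (c = '\n' ∧ PySem.Chars.startswith t ['(']) then some t
            else firstSuffix t := rfl
      rw [heq, if_pos ⟨hp'.1.symm, (PySem.Chars.startswith_iff t ['(']).mpr hp'.2⟩]
      simp
    · have hfs : firstSuffix (c :: t) = firstSuffix t := by
        simp only [firstSuffix]
        rw [if_neg]
        intro hx
        exact hp (by simp [List.isPrefixOf, hx.1]; exact (PySem.Chars.startswith_iff t ['(']).mp hx.2)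
      rw [hgo, if_neg (by simp [hp]), hfs]
      rcases ih with ⟨hf, hn⟩ | ⟨j, hf, hs⟩
      · left; exact ⟨by rw [hf]; simp, hn⟩
      · right
        refine ⟨j + 1, ?_, ?_⟩
        · rw [hf, if_neg (by omega)]
          push_cast
          ring
        · rw [hs]
          simp
  
theorem cleanA_eq_cleanB (cs : List Char) : cleanA cs = cleanB cs := by
  have hcore :
      PySem.Chars.join ['\n']
        (PySem.List.slice (PySem.Chars.splitOn cs ['\n'])
          (some (((cleanLoopA (PySem.Chars.splitOn cs ['\n']) 0).getD 0 : Nat) : Int)) none)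
      = (if PySem.Chars.startswith cs ['('] then cs
         else
           if PySem.Chars.find cs ['\n', '('] ≠ -1 then
             PySem.Chars.slice cs (some (PySem.Chars.find cs ['\n', '('] + 1)) none
           else cs) := by
    rw [splitOn_eq_mySplit]
    obtain ⟨h, t, hms, hsw⟩ := headLine cs
    rw [hms]
    simp only [cleanLoopA]
    by_cases hp : PySem.Chars.startswith cs ['(']
    · rw [if_pos (hsw.trans (by simp [hp])), if_pos hp]
      simp only [Option.getD_some, Nat.cast_zero, PySem.List.slice_zero_start,
        PySem.List.slice_none_none]
      rw [← hms]
      exact joinNl_mySplit cs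
    · rw [if_neg (by rw [hsw]; simp [hp]), if_neg (by simp [hp])]
      have hM := tail_invariant cs
      have htail : (mySplit cs).tail = t := by rw [hms]; rfl
      rw [htail] at hM
      rw [cleanLoopA_shift t 1]
      rcases find_firstSuffix cs with ⟨hf, hn⟩ | ⟨j, hf, hs⟩
      · rw [if_neg (by simp [hf])]
        cases hL : cleanLoopA t 0 with
        | some k => rw [hL] at hM; obtain ⟨s, hc, -⟩ := hM; rw [hn] at hc; exact absurd hc (by simp)
        | none =>
          simp only [Option.map_none, Option.getD_none, Nat.cast_zero,
            PySem.List.slice_zero_start, PySem.List.slice_none_none]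
          rw [← hms]
          exact joinNl_mySplit cs
      · rw [if_pos (by rw [hf]; omega)]
        cases hL : cleanLoopA t 0 with
        | none => rw [hL] at hM; rw [hM] at hs; exact absurd hs (by simp)
        | some k =>
          rw [hL] at hM
          have hM' : ∃ s, firstSuffix cs = some s ∧
              PySem.Chars.join ['\n'] (List.drop (k + 1) (mySplit cs)) = s := hM
          obtain ⟨s, hc, hjoin⟩ := hM'
          rw [hs] at hc
          simp only [Option.map_some, Option.getD_some]
          rw [hms] at hjoin
          rw [PySem.List.slice_from_natCast, hjoin]
          have hdropB : PySem.Chars.slice cs (some ((j : Int) + 1)) none = cs.drop (j + 1) := by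
            have hcast : ((j : Int) + 1) = ((j + 1 : Nat) : Int) := by push_cast; ring
            rw [hcast]
            simp only [PySem.Chars.slice_eq_listSlice]
            exact PySem.List.slice_from_natCast _ _
          rw [hf, hdropB]
          exact (Option.some_inj.mp hc).symm
  simp only [cleanA, cleanB]
  rw [hcore]

-- ===== VERDICT (by name: the statement is the Claim_ definition above) =====
theorem clean_example_spec : Claim_equal_clean_example := by
  intro ex _
  unfold Spec_clean_example clean_example clean_example_alt
  rw [cleanA_eq_cleanB]
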